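-- pv_equiv track=rewrite | github.com/sonneveld/advent-of-code | advent15/09/solution.py | part_1
-- ===== SOURCE A (Python) =====
-- from itertools import permutations
--
-- def part_1(data):
--
--     places = set()
--
--     distance_by = {}
--
--     for left, right, dist in data:
--         places.add(left)
--         places.add(right)
--         k= frozenset((left, right))
--         distance_by[k] = dist
--
--
--     results = set()
--     for path in permutations(places):
--
--         distance = 0
--         prev = None
--         for p in path:
--             if prev is not None:
--                 k= frozenset((prev, p))
--                 distance += distance_by[k]
--             prev = p
--
--         results.add(distance)
--
--     return results
-- ===== SOURCE B (Python) =====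
-- def part_1(data):
--     # distances keyed by the unordered pair of endpoints (last entry wins, like A's dict)
--     distance_by = {frozenset((left, right)): dist for left, right, dist in data}
--
--     places = []
--     for left, right, _ in data:
--         for p in (left, right):
--             if p not in places:
--                 places.append(p)
--
--     if not places:
--         return {0}
--
--     results = set()
--
--     def walk(remaining, prev, acc):
--         if not remaining:
--             results.add(acc)
--             return
--         for i, p in enumerate(remaining):
--             walk(remaining[:i] + remaining[i + 1:], p,
--                  acc + distance_by[frozenset((prev, p))])
--
--     for i, p in enumerate(places):
--         walk(places[:i] + places[i + 1:], p, 0)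
--
--     return results
-- ===== Notes on version B (the rewrite author's own statement) =====
-- stated objective: alternative
-- what changed: A materialises every permutation and then re-sums each path with a prev/distance loop; B does a recursive DFS over partial paths that threads the running distance as an accumulator and adds it to the result set at each leaf, never building permutation tuples.
import Mathlib
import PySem

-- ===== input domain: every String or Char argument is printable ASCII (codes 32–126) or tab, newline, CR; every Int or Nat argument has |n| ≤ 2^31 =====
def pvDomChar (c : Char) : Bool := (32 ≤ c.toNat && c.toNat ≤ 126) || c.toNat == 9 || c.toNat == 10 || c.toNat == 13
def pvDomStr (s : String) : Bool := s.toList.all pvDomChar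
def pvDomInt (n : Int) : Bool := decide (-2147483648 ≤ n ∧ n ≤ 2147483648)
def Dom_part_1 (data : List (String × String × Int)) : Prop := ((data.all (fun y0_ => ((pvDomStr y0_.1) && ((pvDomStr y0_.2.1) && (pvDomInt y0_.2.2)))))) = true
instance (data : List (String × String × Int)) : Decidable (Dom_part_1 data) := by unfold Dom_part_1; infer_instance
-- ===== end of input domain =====

-- B replaces A's permutations-then-resum loop by a DFS over partial paths that threads the
-- running distance as an accumulator (objective: alternative; same exact set of path sums).

-- Shared encoding of Python's frozenset((l, r)) of one or two strings: the pair sorted;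
-- two such frozensets are equal exactly when the sorted pairs are equal.
def pvKey (l r : String) : String × String := if l ≤ r then (l, r) else (r, l)

-- ===== PORT A =====
-- A's for-p-in-path loop: state (prev, distance); distance_by[k] ported as getD
-- (exact under Pre_, which excludes the KeyError inputs)
def pvPathSum (d : PySem.Dict (String × String) Int) (path : List String) : Int :=
  (path.foldl (fun st p =>
      match st.1 with
      | some prev => (some p, st.2 + d.getD (pvKey prev p) 0)
      | none => (some p, st.2)) ((none : Option String), (0 : Int))).2

def part_1 (data : List (String × String × Int)) : List Int :=
  let st := data.foldl
    (fun st t => (PySem.Set.add (PySem.Set.add st.1 t.1) t.2.1,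
                  st.2.insert (pvKey t.1 t.2.1) t.2.2))
    ((PySem.Set.empty : PySem.Set String), (PySem.Dict.empty : PySem.Dict (String × String) Int))
  -- permutations(places) = all permutations of the whole set
  (PySem.List.permutations st.1 st.1.length).foldl
    (fun results path => PySem.Set.add results (pvPathSum st.2 path))
    (PySem.Set.empty : PySem.Set Int)

-- ===== PORT B =====
-- pvPick rem = [(rem[i], rem[:i] + rem[i+1:]) for i in range(len(rem))]  (B's enumerate + slicing)
def pvPick {α : Type} : List α → List (α × List α)
  | [] => []
  | x :: xs => (x, xs) :: (pvPick xs).map (fun pr => (pr.1, x :: pr.2))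

theorem pvPick_length {α : Type} : ∀ (xs : List α), ∀ pr ∈ pvPick xs, pr.2.length + 1 = xs.length := by
  intro xs
  induction xs with
  | nil => intro pr h; simp [pvPick] at h
  | cons x xs ih =>
    intro pr h
    simp only [pvPick, List.mem_cons, List.mem_map] at h
    rcases h with h | ⟨q, hq, rfl⟩
    · subst h; simp
    · have := ih q hq; simp [← this]

-- B's recursive walk(remaining, prev, acc): at a leaf add acc to results,
-- otherwise recurse on each (p, rest) with the edge distance added into the accumulator
def pvWalk (d : PySem.Dict (String × String) Int) :
    List String → String → Int → PySem.Set Int → PySem.Set Int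
  | [], _, acc, res => PySem.Set.add res acc
  | x :: xs, prev, acc, res =>
    (pvPick (x :: xs)).attach.foldl
      (fun res pr => pvWalk d pr.1.2 pr.1.1 (acc + d.getD (pvKey prev pr.1.1) 0) res) res
termination_by rem => rem.length
decreasing_by
  have := pvPick_length (x :: xs) pr.1 pr.2
  simp at this ⊢
  omega

def part_1_alt (data : List (String × String × Int)) : List Int :=
  let distance_by := data.foldl
    (fun m t => m.insert (pvKey t.1 t.2.1) t.2.2)
    (PySem.Dict.empty : PySem.Dict (String × String) Int)
  let places := data.foldl
    (fun s t => PySem.Set.add (PySem.Set.add s t.1) t.2.1)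
    (PySem.Set.empty : PySem.Set String)
  match places with
  | [] => PySem.Set.ofList [0]
  | _ :: _ =>
    (pvPick places).foldl (fun res pr => pvWalk distance_by pr.2 pr.1 0 res)
      (PySem.Set.empty : PySem.Set Int)

-- ===== PRECONDITION & SPEC =====
def pvPlacesOf (data : List (String × String × Int)) : List String :=
  data.flatMap (fun t => [t.1, t.2.1])

-- Pre_ excludes exactly the inputs on which A raises KeyError: some unordered pair of
-- distinct mentioned places has no distance entry in data.
def Pre_part_1 (data : List (String × String × Int)) : Prop :=
  ∀ p ∈ pvPlacesOf data, ∀ q ∈ pvPlacesOf data, p ≠ q →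
    ∃ t ∈ data, (t.1 = p ∧ t.2.1 = q) ∨ (t.1 = q ∧ t.2.1 = p)
instance (data : List (String × String × Int)) : Decidable (Pre_part_1 data) := by
  unfold Pre_part_1; infer_instance

def pvWitness_part_1 : (List (String × String × Int)) :=
  [("a", "b", 5), ("b", "c", 2), ("a", "c", 7)]

def Spec_part_1 (data : List (String × String × Int)) (out : List Int) : Prop := out = part_1_alt data
instance (data : List (String × String × Int)) (out : List Int) : Decidable (Spec_part_1 data out) := by unfold Spec_part_1; infer_instance

-- ===== CLAIM (what is proved, stated in full; the proofs are below) =====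
def Claim_equal_part_1 : Prop := ∀ (data : List (String × String × Int)), Dom_part_1 data → Pre_part_1 data → Spec_part_1 data (part_1 data)

-- ===== LEMMAS AND PROOFS =====

-- the distance of a path written head-first: sum of consecutive lookups
def pvChain (d : PySem.Dict (String × String) Int) : String → List String → Int
  | _, [] => 0
  | prev, p :: rest => d.getD (pvKey prev p) 0 + pvChain d p rest

theorem pvPathSum_loop (d : PySem.Dict (String × String) Int) :
    ∀ (path : List String) (prev : String) (acc : Int),
      (path.foldl (fun st p =>
          match st.1 with
          | some prev => (some p, st.2 + d.getD (pvKey prev p) 0)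
          | none => (some p, st.2)) ((some prev : Option String), acc)).2
        = acc + pvChain d prev path := by
  intro path
  induction path with
  | nil => intro prev acc; simp [pvChain]
  | cons p rest ih => intro prev acc; simp [List.foldl, pvChain, ih, add_assoc]

theorem pvPathSum_nil (d : PySem.Dict (String × String) Int) : pvPathSum d [] = 0 := rfl

theorem pvPathSum_cons (d : PySem.Dict (String × String) Int) (p : String) (path : List String) :
    pvPathSum d (p :: path) = pvChain d p path := by
  simp [pvPathSum, List.foldl, pvPathSum_loop]

-- unfolding one level of itertools.permutations into pvPick form
theorem pvFlatMap_range_pick {α β : Type} :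
    ∀ (xs : List α) (g : α → List α → List β),
      (List.range xs.length).flatMap
          (fun i => match xs[i]? with
                    | none => []
                    | some p => g p (xs.eraseIdx i))
        = (pvPick xs).flatMap (fun pr => g pr.1 pr.2) := by
  intro xs
  induction xs with
  | nil => intro g; simp [pvPick]
  | cons x xs ih =>
    intro g
    rw [List.length_cons, List.range_succ_eq_map, List.flatMap_cons, List.flatMap_map]
    simp only [List.getElem?_cons_zero, List.eraseIdx_cons_zero, Nat.succ_eq_add_one,
      List.getElem?_cons_succ, List.eraseIdx_cons_succ]
    rw [ih (fun p rest => g p (x :: rest))]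
    simp [pvPick, List.flatMap_map]

theorem pvPerms_cons (x : String) (rest : List String) :
    PySem.List.permutations (x :: rest) (x :: rest).length
      = (pvPick (x :: rest)).flatMap
          (fun pr => (PySem.List.permutations pr.2 rest.length).map (pr.1 :: ·)) := by
  rw [List.length_cons, PySem.List.permutations]
  exact pvFlatMap_range_pick (x :: rest)
    (fun p ys => (PySem.List.permutations ys rest.length).map (p :: ·))

-- B's DFS computes exactly the fold of acc + path distance over all permutations
theorem pvWalk_eq (d : PySem.Dict (String × String) Int) :
    ∀ (n : Nat) (rem : List String), rem.length ≤ n → ∀ (prev : String) (acc : Int) (res : PySem.Set Int),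
      pvWalk d rem prev acc res
        = (PySem.List.permutations rem rem.length).foldl
            (fun r π => PySem.Set.add r (acc + pvChain d prev π)) res := by
  intro n
  induction n with
  | zero =>
    intro rem hlen prev acc res
    have : rem = [] := List.eq_nil_of_length_eq_zero (Nat.le_zero.mp hlen)
    subst this
    rw [pvWalk]
    show PySem.Set.add res acc = List.foldl _ res [[]]
    simp [pvChain]
  | succ m ih =>
    intro rem hlen prev acc res
    match rem with
    | [] =>
      rw [pvWalk]
      show PySem.Set.add res acc = List.foldl _ res [[]]
      simp [pvChain]
    | x :: xs =>
      rw [pvWalk,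
        List.foldl_attach (l := pvPick (x :: xs))
          (f := fun res pr => pvWalk d pr.2 pr.1 (acc + d.getD (pvKey prev pr.1) 0) res),
        pvPerms_cons, List.foldl_flatMap]
      apply PySem.List.foldl_congr_mem
      intro r pr hpr
      have hlen2 : pr.2.length = xs.length := by
        have := pvPick_length (x :: xs) pr hpr
        simpa using this
      rw [List.foldl_map, ih pr.2 (by simp at hlen; omega) pr.1 (acc + d.getD (pvKey prev pr.1) 0) r, hlen2]
      apply PySem.List.foldl_congr_mem
      intro r' π _
      simp [pvChain, add_assoc]

-- A's single build loop over a pair is the two separate loops of B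
theorem pvBuild_split :
    ∀ (data : List (String × String × Int)) (s : PySem.Set String)
      (m : PySem.Dict (String × String) Int),
      data.foldl
        (fun st t => (PySem.Set.add (PySem.Set.add st.1 t.1) t.2.1,
                      st.2.insert (pvKey t.1 t.2.1) t.2.2)) (s, m)
        = (data.foldl (fun s t => PySem.Set.add (PySem.Set.add s t.1) t.2.1) s,
           data.foldl (fun m t => m.insert (pvKey t.1 t.2.1) t.2.2) m) := by
  intro data
  induction data with
  | nil => intro s m; rfl
  | cons t rest ih => intro s m; simp [List.foldl, ih]

-- ===== VERDICT (by name: the statement is the Claim_ definition above) =====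
theorem part_1_spec : Claim_equal_part_1 := by
  unfold Claim_equal_part_1
  intro data _ _
  unfold Spec_part_1
  simp only [part_1, part_1_alt, pvBuild_split]
  generalize (data.foldl (fun m t => m.insert (pvKey t.1 t.2.1) t.2.2)
      (PySem.Dict.empty : PySem.Dict (String × String) Int)) = d
  generalize (data.foldl (fun s t => PySem.Set.add (PySem.Set.add s t.1) t.2.1)
      (PySem.Set.empty : PySem.Set String)) = places
  cases places with
  | nil =>
    show List.foldl _ _ [[]] = _
    simp [pvPathSum_nil, PySem.Set.add, PySem.Set.ofList, PySem.Set.empty, PySem.Set.contains]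
  | cons x xs =>
    rw [pvPerms_cons, List.foldl_flatMap]
    apply PySem.List.foldl_congr_mem
    intro r pr hpr
    have hlen2 : pr.2.length = xs.length := by
      have := pvPick_length (x :: xs) pr hpr
      simpa using this
    rw [List.foldl_map, pvWalk_eq d pr.2.length pr.2 le_rfl pr.1 0 r, hlen2]
    apply PySem.List.foldl_congr_mem
    intro r' π _
    simp [pvPathSum_cons]
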